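-- pv_equiv track=rewrite | github.com/tfourj/Palladium | Palladium/Services/Python/palladium_ytdlp/packages.py | parse_index_versions_output
-- ===== SOURCE A (Python) =====
-- def parse_index_versions_output(raw_output):
--     text = str(raw_output or "")
--     if not text:
--         return []
--
--     lines = [line.rstrip() for line in text.splitlines()]
--     for index, line in enumerate(lines):
--         stripped = line.strip()
--         if not stripped.lower().startswith("available versions:"):
--             continue
--
--         suffix = stripped.split(":", 1)[1].strip() if ":" in stripped else ""
--         chunks = [suffix] if suffix else []
--
--         for candidate in lines[index + 1:]:
--             clean = candidate.strip()
--             if not clean: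
--                 break
--             lower = clean.lower()
--             if lower.startswith("installed:") or lower.startswith("latest:"):
--                 break
--             if lower.startswith("[notice]") or lower.startswith("warning:") or lower.startswith("error:"):
--                 break
--             chunks.append(clean)
--
--         combined = " ".join(chunks)
--         parsed_versions = []
--         for piece in combined.split(","):
--             version_text = piece.strip()
--             if version_text:
--                 parsed_versions.append(version_text)
--         if parsed_versions:
--             return parsed_versions
--     return []
-- ===== SOURCE B (Python) =====
-- def parse_index_versions_output(raw_output):
--     # Single forward pass: searching/collecting state flag with a chunk buffer.
--     buf = None  # None = searching; list = collecting chunks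
--     for line in (raw_output or "").splitlines():
--         s = line.strip()
--         if buf is None:
--             if s.lower().startswith("available versions:"):
--                 suffix = s.split(":", 1)[1].strip()
--                 buf = [suffix] if suffix else []
--         else:
--             low = s.lower()
--             if (not s) or low.startswith(("installed:", "latest:", "[notice]", "warning:", "error:")):
--                 parsed = [p.strip() for p in " ".join(buf).split(",") if p.strip()]
--                 if parsed:
--                     return parsed
--                 buf = None  # the break line itself can never be a header
--             else:
--                 buf.append(s)
--     if buf is not None:
--         parsed = [p.strip() for p in " ".join(buf).split(",") if p.strip()]
--         if parsed:
--             return parsed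
--     return []
-- ===== Notes on version B (the rewrite author's own statement) =====
-- stated objective: alternative
-- what changed: Replaces A's outer header scan with a nested rescan of the tail (and re-entry from the header's successor on a failed parse) by a single forward pass over the lines driven by a searching/collecting state flag and a chunk buffer.
import Mathlib
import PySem

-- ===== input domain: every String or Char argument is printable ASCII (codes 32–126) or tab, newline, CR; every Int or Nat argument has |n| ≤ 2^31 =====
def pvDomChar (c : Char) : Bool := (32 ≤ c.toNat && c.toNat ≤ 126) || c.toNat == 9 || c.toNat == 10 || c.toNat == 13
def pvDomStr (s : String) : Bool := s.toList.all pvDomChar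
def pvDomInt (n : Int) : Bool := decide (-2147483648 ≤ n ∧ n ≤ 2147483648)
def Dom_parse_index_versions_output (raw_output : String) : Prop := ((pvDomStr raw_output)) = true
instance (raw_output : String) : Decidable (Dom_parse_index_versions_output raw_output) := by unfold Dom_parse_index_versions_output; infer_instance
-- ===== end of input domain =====

-- B is a single forward pass with a searching/collecting state flag, versus A's
-- outer header scan with a nested rescan of the tail (objective: alternative).

-- ===== PORT A =====
-- A's seed: suffix = stripped.split(":", 1)[1].strip() if ":" in stripped else ""; chunks = [suffix] if suffix else []
def pvSeedA (stripped : List Char) : List (List Char) :=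
  let suffix :=
    if PySem.Chars.isIn [':'] stripped then
      PySem.Chars.strip (PySem.List.pyGetD (PySem.Chars.splitOnMax stripped [':'] 1) 1 [])
    else []
  if suffix.isEmpty then [] else [suffix]

-- A's inner loop over lines[index+1:]
def pvCollectA : List (List Char) → List (List Char) → List (List Char)
  | [], chunks => chunks
  | candidate :: rest, chunks =>
    let clean := PySem.Chars.strip candidate
    if clean.isEmpty then chunks
    else
      let low := PySem.Chars.lower clean
      if PySem.Chars.startswith low "installed:".toList || PySem.Chars.startswith low "latest:".toList then chunks
      else if PySem.Chars.startswith low "[notice]".toList || PySem.Chars.startswith low "warning:".toList || PySem.Chars.startswith low "error:".toList then chunks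
      else pvCollectA rest (chunks ++ [clean])

-- A's parse of the combined chunk text (loop with an accumulator)
def pvParseA (chunks : List (List Char)) : List (List Char) :=
  let combined := PySem.Chars.join [' '] chunks
  (PySem.Chars.splitOn combined [',']).foldl
    (fun parsed piece =>
      let vt := PySem.Chars.strip piece
      if vt.isEmpty then parsed else parsed ++ [vt]) []

-- A's outer loop; at position index the slice lines[index+1:] is exactly `rest`
def pvLoopA : List (List Char) → List (List Char)
  | [] => []
  | line :: rest =>
    let stripped := PySem.Chars.strip line
    if !(PySem.Chars.startswith (PySem.Chars.lower stripped) "available versions:".toList) then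
      pvLoopA rest
    else
      let chunks := pvCollectA rest (pvSeedA stripped)
      let parsed := pvParseA chunks
      if parsed.isEmpty then pvLoopA rest else parsed

def parse_index_versions_output (raw_output : String) : List String :=
  let text := raw_output.toList
  if text.isEmpty then []
  else (pvLoopA ((PySem.Chars.splitlines text).map PySem.Chars.rstrip)).map (fun v => String.ofList v)

-- ===== PORT B =====
-- B's finalize: [p.strip() for p in " ".join(buf).split(",") if p.strip()]
def pvFinishB (buf : List (List Char)) : List (List Char) :=
  (PySem.Chars.splitOn (PySem.Chars.join [' '] buf) [',']).filterMap
    (fun p =>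
      let v := PySem.Chars.strip p
      if v.isEmpty then none else some v)

-- B's single pass: none = searching, some buf = collecting
def pvLoopB : List (List Char) → Option (List (List Char)) → List (List Char)
  | [], none => []
  | [], some buf =>
    let parsed := pvFinishB buf
    if parsed.isEmpty then [] else parsed
  | line :: rest, none =>
    let s := PySem.Chars.strip line
    if PySem.Chars.startswith (PySem.Chars.lower s) "available versions:".toList then
      let suffix := PySem.Chars.strip (PySem.List.pyGetD (PySem.Chars.splitOnMax s [':'] 1) 1 [])
      pvLoopB rest (some (if suffix.isEmpty then [] else [suffix]))
    else pvLoopB rest none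
  | line :: rest, some buf =>
    let s := PySem.Chars.strip line
    let low := PySem.Chars.lower s
    if s.isEmpty || PySem.Chars.startswith low "installed:".toList || PySem.Chars.startswith low "latest:".toList
        || PySem.Chars.startswith low "[notice]".toList || PySem.Chars.startswith low "warning:".toList
        || PySem.Chars.startswith low "error:".toList then
      let parsed := pvFinishB buf
      if parsed.isEmpty then pvLoopB rest none else parsed
    else pvLoopB rest (some (buf ++ [s]))

def parse_index_versions_output_alt (raw_output : String) : List String :=
  (pvLoopB (PySem.Chars.splitlines raw_output.toList) none).map (fun v => String.ofList v)

-- ===== PRECONDITION & SPEC =====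
def Spec_parse_index_versions_output (raw_output : String) (out : List String) : Prop := out = parse_index_versions_output_alt raw_output
instance (raw_output : String) (out : List String) : Decidable (Spec_parse_index_versions_output raw_output out) := by unfold Spec_parse_index_versions_output; infer_instance

-- ===== CLAIM (what is proved, stated in full; the proofs are below) =====
def Claim_equal_parse_index_versions_output : Prop := ∀ (raw_output : String), Dom_parse_index_versions_output raw_output → Spec_parse_index_versions_output raw_output (parse_index_versions_output raw_output)

-- ===== LEMMAS AND PROOFS =====

theorem pv_filterMap_ite (g : List Char → List Char) (l : List (List Char)) :
    l.filterMap (fun p => let v := g p; if v.isEmpty then none else some v)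
      = (l.filter (fun p => !(g p).isEmpty)).map g := by
  induction l with
  | nil => rfl
  | cons a t ih =>
    simp only [List.isEmpty_iff] at ih ⊢
    by_cases h : g a = [] <;> simp [h, ih]

theorem pv_parse_eq_finish' (chunks : List (List Char)) :
    (PySem.Chars.splitOn (PySem.Chars.join [' '] chunks) [',']).foldl
      (fun parsed piece =>
        let vt := PySem.Chars.strip piece
        if vt.isEmpty then parsed else parsed ++ [vt]) []
    = (PySem.Chars.splitOn (PySem.Chars.join [' '] chunks) [',']).filterMap
      (fun p =>
        let v := PySem.Chars.strip p
        if v.isEmpty then none else some v) := by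
  rw [pv_filterMap_ite]
  have hf : (fun (parsed : List (List Char)) piece =>
        let vt := PySem.Chars.strip piece
        if vt.isEmpty then parsed else parsed ++ [vt])
      = (fun acc x => if (!(PySem.Chars.strip x).isEmpty) = true then acc ++ [PySem.Chars.strip x] else acc) := by
    funext a x; by_cases h : (PySem.Chars.strip x).isEmpty <;> simp [h]
  rw [hf, PySem.List.foldl_append_if]
  simp

theorem pv_mem_join {chunks : List (List Char)} {x : List Char} {c : Char}
    (hx : x ∈ chunks) (hc : c ∈ x) : c ∈ PySem.Chars.join [' '] chunks := by
  induction chunks with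
  | nil => cases hx
  | cons a t ih =>
    cases t with
    | nil => simp at hx; subst hx; simpa [PySem.Chars.join_singleton] using hc
    | cons b u =>
      rw [PySem.Chars.join_cons_cons]
      rw [List.mem_cons] at hx
      rcases hx with rfl | hx
      · simp [hc]
      · simp only [List.mem_append]
        right; exact ih hx

theorem pv_lowerChar_eq {c t : Char} (h : PySem.Chars.lowerChar c = t) :
    c = t ∨ ((65 ≤ c.toNat ∧ c.toNat ≤ 90) ∧ c.toNat + 32 = t.toNat) := by
  unfold PySem.Chars.lowerChar at h
  split at h
  · right
    rename_i hu
    simp [PySem.Chars.isupper, Char.le_def] at hu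
    have hr : 65 ≤ c.toNat ∧ c.toNat ≤ 90 := by
      constructor <;> [exact hu.1; exact hu.2]
    refine ⟨hr, ?_⟩
    have hv : Nat.isValidChar (c.toNat + 32) := by
      left; omega
    have := congrArg Char.toNat h
    rwa [Char.toNat_ofNat, if_pos hv] at this
  · left; exact h

theorem pv_toNat_inj {c d : Char} (h : c.toNat = d.toNat) : c = d := by
  have := congrArg Char.ofNat h
  rwa [Char.ofNat_toNat, Char.ofNat_toNat] at this

theorem pv_lowerChar_a {c : Char} (h : PySem.Chars.lowerChar c = 'a') : c = 'a' ∨ c = 'A' := by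
  rcases pv_lowerChar_eq h with h1 | ⟨hr, he⟩
  · exact Or.inl h1
  · right
    apply pv_toNat_inj
    show c.toNat = 65
    have : ('a').toNat = 97 := by decide
    omega

theorem pv_lowerChar_colon {c : Char} (h : PySem.Chars.lowerChar c = ':') : c = ':' := by
  rcases pv_lowerChar_eq h with h1 | ⟨hr, he⟩
  · exact h1
  · exfalso
    have : (':').toNat = 58 := by decide
    omega


theorem pv_not_header {x : List Char}
    (hx : ∀ c ∈ x, c = ',' ∨ PySem.Chars.isspace c = true) :
    PySem.Chars.startswith (PySem.Chars.lower x) "available versions:".toList = false := by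
  by_contra hcon
  have h : PySem.Chars.startswith (PySem.Chars.lower x) "available versions:".toList = true := by
    simpa using hcon
  rw [PySem.Chars.startswith_iff] at h
  obtain ⟨t, ht⟩ := h
  cases x with
  | nil => simp [PySem.Chars.lower] at ht
  | cons c x' =>
    have hc : PySem.Chars.lowerChar c = 'a' := by
      have : "available versions:".toList = 'a' :: "vailable versions:".toList := by decide
      rw [this] at ht
      simp [PySem.Chars.lower] at ht
      exact ht.1.symm
    rcases pv_lowerChar_a hc with rfl | rfl <;>
      rcases hx _ (List.mem_cons_self ..) with h1 | h1 <;>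
      exact absurd h1 (by decide)

theorem pv_head_prefix {x : List Char} {a b : Char} {p q : List Char}
    (ha : PySem.Chars.startswith x (a :: p) = true)
    (hb : PySem.Chars.startswith x (b :: q) = true) : a = b := by
  rw [PySem.Chars.startswith_iff] at ha hb
  obtain ⟨t, ht⟩ := ha
  obtain ⟨u, hu⟩ := hb
  rw [← ht] at hu
  simpa using (congrArg (·.head?) hu).symm

theorem pv_break_not_header {s : List Char}
    (h : (s.isEmpty || PySem.Chars.startswith (PySem.Chars.lower s) "installed:".toList
        || PySem.Chars.startswith (PySem.Chars.lower s) "latest:".toList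
        || PySem.Chars.startswith (PySem.Chars.lower s) "[notice]".toList
        || PySem.Chars.startswith (PySem.Chars.lower s) "warning:".toList
        || PySem.Chars.startswith (PySem.Chars.lower s) "error:".toList) = true) :
    PySem.Chars.startswith (PySem.Chars.lower s) "available versions:".toList = false := by
  by_contra hcon
  have hh : PySem.Chars.startswith (PySem.Chars.lower s) ('a' :: "vailable versions:".toList) = true := by
    have : "available versions:".toList = 'a' :: "vailable versions:".toList := by decide
    rw [← this]; simpa using hcon
  simp only [Bool.or_eq_true] at h
  rcases h with ((((he | h1) | h2) | h3) | h4) | h5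
  · have : s = [] := by simpa [List.isEmpty_iff] using he
    subst this
    simp [PySem.Chars.lower] at hh
    revert hh; decide
  · have : "installed:".toList = 'i' :: "nstalled:".toList := by decide
    rw [this] at h1; exact absurd (pv_head_prefix hh h1) (by decide)
  · have : "latest:".toList = 'l' :: "atest:".toList := by decide
    rw [this] at h2; exact absurd (pv_head_prefix hh h2) (by decide)
  · have : "[notice]".toList = '[' :: "notice]".toList := by decide
    rw [this] at h3; exact absurd (pv_head_prefix hh h3) (by decide)
  · have : "warning:".toList = 'w' :: "arning:".toList := by decide
    rw [this] at h4; exact absurd (pv_head_prefix hh h4) (by decide)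
  · have : "error:".toList = 'e' :: "rror:".toList := by decide
    rw [this] at h5; exact absurd (pv_head_prefix hh h5) (by decide)

theorem pv_header_colon {s : List Char}
    (h : PySem.Chars.startswith (PySem.Chars.lower s) "available versions:".toList = true) :
    PySem.Chars.isIn [':'] s = true := by
  rw [PySem.Chars.startswith_iff] at h
  have hmem : ':' ∈ PySem.Chars.lower s := by
    apply h.mem
    decide
  simp only [PySem.Chars.lower, List.mem_map] at hmem
  obtain ⟨c, hc, hlc⟩ := hmem
  have : c = ':' := pv_lowerChar_colon hlc
  subst this
  rw [PySem.Chars.isIn_iff_infix]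
  obtain ⟨l1, l2, rfl⟩ := List.append_of_mem hc
  exact ⟨l1, l2, by simp⟩

theorem pv_strip_nil {p : List Char} (h : (PySem.Chars.strip p).isEmpty = true) :
    ∀ c ∈ p, PySem.Chars.isspace c = true := by
  intro c hc
  unfold PySem.Chars.strip PySem.Chars.rstrip PySem.Chars.lstrip at h
  rw [List.isEmpty_iff, List.reverse_eq_nil_iff, List.dropWhile_eq_nil_iff] at h
  have hdrop : ∀ x ∈ List.dropWhile PySem.Chars.isspace p, PySem.Chars.isspace x = true := by
    intro x hx
    exact h x (by simpa using hx)
  rcases List.mem_append.mp (by rw [List.takeWhile_append_dropWhile]; exact hc :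
      c ∈ List.takeWhile PySem.Chars.isspace p ++ List.dropWhile PySem.Chars.isspace p) with h1 | h1
  · exact List.mem_takeWhile_imp h1
  · exact hdrop c h1

theorem pv_rstrip_append_ws {v : List Char} (hv : ∀ c ∈ v, PySem.Chars.isspace c = true)
    (x : List Char) : PySem.Chars.rstrip (x ++ v) = PySem.Chars.rstrip x := by
  unfold PySem.Chars.rstrip
  rw [List.reverse_append, List.dropWhile_append]
  have : List.dropWhile PySem.Chars.isspace v.reverse = [] := by
    rw [List.dropWhile_eq_nil_iff]; intro c hc; exact hv c (by simpa using hc)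
  simp [this]

theorem pv_strip_rstrip (l : List Char) :
    PySem.Chars.strip (PySem.Chars.rstrip l) = PySem.Chars.strip l := by
  have hv : ∀ c ∈ (List.takeWhile PySem.Chars.isspace l.reverse).reverse, PySem.Chars.isspace c = true := by
    intro c hc; exact List.mem_takeWhile_imp (by simpa using hc)
  have hsplit : PySem.Chars.rstrip l ++ (List.takeWhile PySem.Chars.isspace l.reverse).reverse = l := by
    unfold PySem.Chars.rstrip
    rw [← List.reverse_append, List.takeWhile_append_dropWhile, List.reverse_reverse]
  conv_rhs => rw [← hsplit]
  generalize hu : PySem.Chars.rstrip l = u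
  generalize hw : (List.takeWhile PySem.Chars.isspace l.reverse).reverse = v
  rw [hw] at hv
  show PySem.Chars.strip u = PySem.Chars.strip (u ++ v)
  unfold PySem.Chars.strip PySem.Chars.lstrip
  rw [List.dropWhile_append]
  by_cases he : (List.dropWhile PySem.Chars.isspace u).isEmpty
  · rw [if_pos he]
    have h1 : List.dropWhile PySem.Chars.isspace u = [] := by simpa [List.isEmpty_iff] using he
    have h2 : List.dropWhile PySem.Chars.isspace v = [] := by
      rw [List.dropWhile_eq_nil_iff]; exact hv
    simp [h1, h2]
  · rw [if_neg he]
    rw [pv_rstrip_append_ws hv]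

theorem pv_go_acc_mem (sep : List Char) : ∀ (fuel : ℕ) (l cur : List Char) (acc : List (List Char)) (p : List Char),
    p ∈ acc → p ∈ PySem.Chars.splitOn.go sep fuel l cur acc := by
  intro fuel
  induction fuel with
  | zero =>
    intro l cur acc p hp
    unfold PySem.Chars.splitOn.go
    simp [hp]
  | succ n ih =>
    intro l cur acc p hp
    cases l with
    | nil =>
      unfold PySem.Chars.splitOn.go
      simp [hp]
    | cons c rest =>
      unfold PySem.Chars.splitOn.go
      by_cases hpre : sep.isPrefixOf (c :: rest)
      · simp only [hpre, if_true]
        exact ih _ _ _ p (by simp [hp])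
      · simp only [hpre]
        exact ih _ _ _ p hp

theorem pv_go_chars : ∀ (fuel : ℕ) (l cur : List Char) (acc : List (List Char)),
    (∀ p ∈ PySem.Chars.splitOn.go [','] fuel l cur acc, ∀ c ∈ p, PySem.Chars.isspace c = true) →
    (∀ c ∈ l, c = ',' ∨ PySem.Chars.isspace c = true) ∧ (∀ c ∈ cur, PySem.Chars.isspace c = true) := by
  intro fuel
  induction fuel with
  | zero =>
    intro l cur acc h
    have hmem : (cur.reverse ++ l) ∈ PySem.Chars.splitOn.go [','] 0 l cur acc := by
      unfold PySem.Chars.splitOn.go; simp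
    have := h _ hmem
    constructor
    · intro c hc; right; exact this c (by simp [hc])
    · intro c hc; exact this c (by simp [hc])
  | succ n ih =>
    intro l cur acc h
    cases l with
    | nil =>
      have hmem : cur.reverse ∈ PySem.Chars.splitOn.go [','] (n+1) [] cur acc := by
        unfold PySem.Chars.splitOn.go; simp
      have := h _ hmem
      refine ⟨?_, ?_⟩
      · intro c hc; cases hc
      · intro c hc; exact this c (by simp [hc])
    | cons c rest =>
      by_cases hpre : List.isPrefixOf [','] (c :: rest)
      · have hc : c = ',' := by
          rw [List.isPrefixOf_iff_prefix, List.cons_prefix_cons] at hpre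
          exact hpre.1.symm
        subst hc
        have hgo : PySem.Chars.splitOn.go [','] (n+1) (',' :: rest) cur acc
            = PySem.Chars.splitOn.go [','] n rest [] (cur.reverse :: acc) := by
          conv_lhs => rw [PySem.Chars.splitOn.go.eq_def]
          simp [hpre]
        rw [hgo] at h
        obtain ⟨hl, _⟩ := ih rest [] (cur.reverse :: acc) h
        refine ⟨?_, ?_⟩
        · intro d hd
          rw [List.mem_cons] at hd
          rcases hd with rfl | hd
          · exact Or.inl rfl
          · exact hl d hd
        · intro d hd
          have hmem : cur.reverse ∈ PySem.Chars.splitOn.go [','] n rest [] (cur.reverse :: acc) :=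
            pv_go_acc_mem _ _ _ _ _ _ (by simp)
          exact h _ hmem d (by simp [hd])
      · have hgo : PySem.Chars.splitOn.go [','] (n+1) (c :: rest) cur acc
            = PySem.Chars.splitOn.go [','] n rest (c :: cur) acc := by
          conv_lhs => rw [PySem.Chars.splitOn.go.eq_def]
          simp [hpre]
        rw [hgo] at h
        obtain ⟨hl, hcur⟩ := ih rest (c :: cur) acc h
        refine ⟨?_, ?_⟩
        · intro d hd
          rw [List.mem_cons] at hd
          rcases hd with rfl | hd
          · exact Or.inr (hcur d (by simp))
          · exact hl d hd
        · intro d hd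
          exact hcur d (by simp [hd])

theorem pv_splitOn_chars (cs : List Char)
    (h : ∀ p ∈ PySem.Chars.splitOn cs [','], ∀ c ∈ p, PySem.Chars.isspace c = true) :
    ∀ c ∈ cs, c = ',' ∨ PySem.Chars.isspace c = true := by
  unfold PySem.Chars.splitOn at h
  exact (pv_go_chars (cs.length + 1) cs [] [] h).1

theorem pv_parse_eq_finish (chunks : List (List Char)) : pvParseA chunks = pvFinishB chunks :=
  pv_parse_eq_finish' chunks

theorem pv_parse_empty_chars {chunks : List (List Char)}
    (h : (pvParseA chunks).isEmpty = true) {x : List Char} (hx : x ∈ chunks) :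
    ∀ c ∈ x, c = ',' ∨ PySem.Chars.isspace c = true := by
  intro c hc
  rw [pv_parse_eq_finish] at h
  unfold pvFinishB at h
  rw [List.isEmpty_iff, List.filterMap_eq_nil_iff] at h
  have hall : ∀ p ∈ PySem.Chars.splitOn (PySem.Chars.join [' '] chunks) [','],
      ∀ d ∈ p, PySem.Chars.isspace d = true := by
    intro p hp
    have := h p hp
    by_cases he : (PySem.Chars.strip p).isEmpty
    · exact pv_strip_nil he
    · simp [List.isEmpty_iff] at he
      simp [he] at this
  exact pv_splitOn_chars _ hall c (pv_mem_join hx hc)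

theorem pv_collect_mem {x : List Char} : ∀ (ls chunks : List (List Char)),
    x ∈ chunks → x ∈ pvCollectA ls chunks := by
  intro ls
  induction ls with
  | nil => intro chunks hx; exact hx
  | cons a t ih =>
    intro chunks hx
    unfold pvCollectA
    dsimp only
    split_ifs <;> first | exact hx | exact ih _ (by simp [hx])

theorem pv_collect_rstrip (ls : List (List Char)) : ∀ chunks,
    pvCollectA (ls.map PySem.Chars.rstrip) chunks = pvCollectA ls chunks := by
  induction ls with
  | nil => intro chunks; rfl
  | cons a t ih =>
    intro chunks
    show pvCollectA (PySem.Chars.rstrip a :: t.map PySem.Chars.rstrip) chunks = _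
    unfold pvCollectA
    dsimp only
    rw [pv_strip_rstrip]
    split_ifs <;> first | rfl | exact ih _

theorem pv_loopA_rstrip (ls : List (List Char)) :
    pvLoopA (ls.map PySem.Chars.rstrip) = pvLoopA ls := by
  induction ls with
  | nil => rfl
  | cons a t ih =>
    show pvLoopA (PySem.Chars.rstrip a :: t.map PySem.Chars.rstrip) = _
    unfold pvLoopA
    dsimp only
    rw [pv_strip_rstrip]
    simp only [pv_collect_rstrip, ih]

-- the simultaneous induction: A's rescanning outer loop = B's single pass
theorem pv_loops (n : ℕ) : ∀ ls : List (List Char), ls.length ≤ n →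
    (pvLoopA ls = pvLoopB ls none) ∧
    (∀ buf, pvLoopB ls (some buf) =
      if (pvParseA (pvCollectA ls buf)).isEmpty then pvLoopA ls else pvParseA (pvCollectA ls buf)) := by
  induction n with
  | zero =>
    intro ls hls
    have : ls = [] := by cases ls <;> simp_all
    subst this
    refine ⟨rfl, ?_⟩
    intro buf
    show (if (pvFinishB buf).isEmpty then ([] : List (List Char)) else pvFinishB buf) = _
    rw [pv_parse_eq_finish]
    rfl
  | succ n ih =>
    intro ls hls
    cases ls with
    | nil =>
      refine ⟨rfl, ?_⟩
      intro buf
      show (if (pvFinishB buf).isEmpty then ([] : List (List Char)) else pvFinishB buf) = _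
      rw [pv_parse_eq_finish]
      rfl
    | cons line rest =>
      have hr : rest.length ≤ n := by simpa using hls
      refine ⟨?_, ?_⟩
      · -- searching state
        by_cases hh : PySem.Chars.startswith (PySem.Chars.lower (PySem.Chars.strip line)) "available versions:".toList
        · -- header line: seed and enter collection
          have hcol : PySem.Chars.isIn [':'] (PySem.Chars.strip line) = true := pv_header_colon hh
          unfold pvLoopA pvLoopB
          simp only [hh, Bool.not_true, if_pos, Bool.false_eq_true, if_false]
          rw [(ih rest hr).2]
          unfold pvSeedA
          rw [if_pos hcol]
        · -- not a header: both skip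
          unfold pvLoopA pvLoopB
          simp only [hh, Bool.not_false, if_true, Bool.false_eq_true, if_false]
          exact (ih rest hr).1
      · -- collecting state
        intro buf
        by_cases hbrk : (PySem.Chars.strip line).isEmpty
            || PySem.Chars.startswith (PySem.Chars.lower (PySem.Chars.strip line)) "installed:".toList
            || PySem.Chars.startswith (PySem.Chars.lower (PySem.Chars.strip line)) "latest:".toList
            || PySem.Chars.startswith (PySem.Chars.lower (PySem.Chars.strip line)) "[notice]".toList
            || PySem.Chars.startswith (PySem.Chars.lower (PySem.Chars.strip line)) "warning:".toList
            || PySem.Chars.startswith (PySem.Chars.lower (PySem.Chars.strip line)) "error:".toList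
        · -- break line: finalize
          have hnh := pv_break_not_header hbrk
          have hcA : pvCollectA (line :: rest) buf = buf := by
            unfold pvCollectA
            dsimp only
            simp only [Bool.or_eq_true, List.isEmpty_iff] at hbrk
            split_ifs with h1 h2 h3 <;> first | rfl | simp_all [List.isEmpty_iff]
          have hlB : pvLoopB (line :: rest) (some buf)
              = if (pvFinishB buf).isEmpty then pvLoopB rest none else pvFinishB buf := by
            conv_lhs => unfold pvLoopB
            dsimp only
            rw [if_pos hbrk]
          rw [hlB, hcA, ← pv_parse_eq_finish]
          by_cases he : (pvParseA buf).isEmpty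
          · rw [if_pos he, if_pos he, ← (ih rest hr).1]
            conv_rhs => unfold pvLoopA
            dsimp only
            rw [if_pos (show (!PySem.Chars.startswith (PySem.Chars.lower (PySem.Chars.strip line))
              "available versions:".toList) = true by rw [hnh]; rfl)]
          · rw [if_neg he, if_neg he]
        · -- ordinary line: append to the buffer
          have hcA : pvCollectA (line :: rest) buf = pvCollectA rest (buf ++ [PySem.Chars.strip line]) := by
            conv_lhs => unfold pvCollectA
            dsimp only
            simp only [Bool.or_eq_true, not_or] at hbrk
            obtain ⟨⟨⟨⟨⟨h0, h1⟩, h2⟩, h3⟩, h4⟩, h5⟩ := hbrk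
            rw [if_neg (fun hc => h0 (by simp [hc])),
              if_neg (by intro hcon; simp only [Bool.or_eq_true] at hcon
                         exact hcon.elim (fun h => h1 h) fun h => h2 h),
              if_neg (by intro hcon; simp only [Bool.or_eq_true] at hcon
                         exact hcon.elim (fun hab => hab.elim (fun h => h3 h) fun h => h4 h) fun h => h5 h)]
          have hlB : pvLoopB (line :: rest) (some buf)
              = pvLoopB rest (some (buf ++ [PySem.Chars.strip line])) := by
            conv_lhs => unfold pvLoopB
            dsimp only
            rw [if_neg (by simpa using hbrk)]
          rw [hlB, (ih rest hr).2, hcA]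
          by_cases he : (pvParseA (pvCollectA rest (buf ++ [PySem.Chars.strip line]))).isEmpty
          · rw [if_pos he, if_pos he]
            have hmem : PySem.Chars.strip line ∈ pvCollectA rest (buf ++ [PySem.Chars.strip line]) :=
              pv_collect_mem _ _ (by simp)
            have hnh := pv_not_header (pv_parse_empty_chars he hmem)
            conv_rhs => unfold pvLoopA
            dsimp only
            rw [if_pos (show (!PySem.Chars.startswith (PySem.Chars.lower (PySem.Chars.strip line))
              "available versions:".toList) = true by rw [hnh]; rfl)]
          · rw [if_neg he, if_neg he]

-- ===== VERDICT (by name: the statement is the Claim_ definition above) =====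
theorem parse_index_versions_output_spec : Claim_equal_parse_index_versions_output := by
  intro raw _
  unfold Spec_parse_index_versions_output parse_index_versions_output parse_index_versions_output_alt
  by_cases h : raw.toList.isEmpty
  · have h0 : raw.toList = [] := by simpa [List.isEmpty_iff] using h
    rw [h0]
    decide
  · simp only [h, Bool.false_eq_true, if_false]
    rw [pv_loopA_rstrip, (pv_loops (PySem.Chars.splitlines raw.toList).length _ le_rfl).1]
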